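-- pv_equiv track=rewrite | github.com/thanstavridis/FastA_algorithm | FastA.py | diagonal_dictionary
-- ===== SOURCE A (Python) =====
-- def diagonal_dictionary(sequence_indexes_dictionary,querykmers_indexes):
--     diag_dict = {}
--     for kmer in querykmers_indexes.keys():
--         if kmer in sequence_indexes_dictionary.keys():
--             i_s = querykmers_indexes[kmer]
--             p_s = sequence_indexes_dictionary[kmer]
--             for j in range(len(i_s)):
--                 for k in range(len(p_s)):
--                     d = i_s[j] - p_s[k]
--                     if d in diag_dict.keys():
--                         diag_dict[d] += 1
--                     else:
--                         diag_dict[d] = 1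
--     return diag_dict
-- ===== SOURCE B (Python) =====
-- def diagonal_dictionary(sequence_indexes_dictionary, querykmers_indexes):
--     # Count each diagonal once per distinct (query-index, sequence-index) value pair,
--     # weighted by the two multiplicities, instead of once per raw index pair.
--     diag = {}
--     for kmer, i_s in querykmers_indexes.items():
--         if kmer not in sequence_indexes_dictionary:
--             continue
--         p_s = sequence_indexes_dictionary[kmer]
--         ci = {}
--         for i in i_s:
--             ci[i] = ci.get(i, 0) + 1
--         cp = {}
--         for p in p_s:
--             cp[p] = cp.get(p, 0) + 1
--         for vi, ni in ci.items():
--             for vp, np in cp.items():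
--                 d = vi - vp
--                 diag[d] = diag.get(d, 0) + ni * np
--     return diag
-- ===== Notes on version B (the rewrite author's own statement) =====
-- stated objective: alternative
-- what changed: A increments the diagonal dict once per raw index pair over nested range(len) loops; B first builds a value->multiplicity counter for each of the two position lists of a shared kmer and adds ni*np per distinct value pair, so duplicate positions are aggregated before the quadratic pairing step.
import Mathlib
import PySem

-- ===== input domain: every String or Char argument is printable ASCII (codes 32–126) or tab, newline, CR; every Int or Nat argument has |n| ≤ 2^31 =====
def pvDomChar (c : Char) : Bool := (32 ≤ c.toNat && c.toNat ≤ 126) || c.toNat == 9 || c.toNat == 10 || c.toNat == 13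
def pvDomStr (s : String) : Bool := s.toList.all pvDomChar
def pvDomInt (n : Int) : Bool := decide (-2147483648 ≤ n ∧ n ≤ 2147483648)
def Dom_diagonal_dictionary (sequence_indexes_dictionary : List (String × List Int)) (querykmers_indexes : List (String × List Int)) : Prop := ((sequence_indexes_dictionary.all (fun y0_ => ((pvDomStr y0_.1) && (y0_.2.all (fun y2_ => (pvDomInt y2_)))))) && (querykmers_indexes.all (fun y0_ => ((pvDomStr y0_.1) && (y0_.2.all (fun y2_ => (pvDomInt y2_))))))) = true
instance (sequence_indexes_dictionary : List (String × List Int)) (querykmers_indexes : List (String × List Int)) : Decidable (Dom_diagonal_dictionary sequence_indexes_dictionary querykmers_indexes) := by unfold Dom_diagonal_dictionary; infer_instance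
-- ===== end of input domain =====

-- B counts each diagonal once per distinct (query-value, sequence-value) pair, weighted by the two
-- multiplicities, instead of once per raw index pair; return value proved equal, neither mutates.

-- ===== PORT A =====
-- literal port of A: iterate the query dict's keys, nested index loops over the two
-- position lists, increment-or-initialise the diagonal counter dict per index pair.
-- (the dict lookups use getD []: both keys are known present — one comes from .keys(), the other passed the `in` test)
def diagonal_dictionary (sequence_indexes_dictionary : List (String × List Int)) (querykmers_indexes : List (String × List Int)) : List (Int × Int) :=
  let sd := PySem.Dict.ofList sequence_indexes_dictionary
  let qd := PySem.Dict.ofList querykmers_indexes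
  (qd.keys.foldl (fun diag kmer =>
      if sd.contains kmer then
        let i_s := qd.getD kmer []
        let p_s := sd.getD kmer []
        (PySem.List.pyRange 0 (i_s.length : Int) 1).foldl (fun diag j =>
          (PySem.List.pyRange 0 (p_s.length : Int) 1).foldl (fun diag k =>
            let d := PySem.List.pyGetD i_s j 0 - PySem.List.pyGetD p_s k 0
            if diag.contains d then diag.modify d 0 (· + 1) else diag.insert d 1)
            diag) diag
      else diag)
    (PySem.Dict.empty : PySem.Dict Int Int)).items

-- ===== PORT B =====
-- literal port of Source B: per shared kmer build the two value→multiplicity counters,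
-- then add ni*np to the diagonal vi-vp for each distinct value pair.
def diagonal_dictionary_alt (sequence_indexes_dictionary : List (String × List Int)) (querykmers_indexes : List (String × List Int)) : List (Int × Int) :=
  let sd := PySem.Dict.ofList sequence_indexes_dictionary
  let qd := PySem.Dict.ofList querykmers_indexes
  (qd.items.foldl (fun diag kv =>
      if sd.contains kv.1 then
        let p_s := sd.getD kv.1 []
        let ci := kv.2.foldl (fun c i => c.insert i (c.getD i 0 + 1)) (PySem.Dict.empty : PySem.Dict Int Int)
        let cp := p_s.foldl (fun c p => c.insert p (c.getD p 0 + 1)) (PySem.Dict.empty : PySem.Dict Int Int)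
        ci.items.foldl (fun diag vn =>
          cp.items.foldl (fun diag wm =>
            let d := vn.1 - wm.1
            diag.insert d (diag.getD d 0 + vn.2 * wm.2)) diag) diag
      else diag)
    (PySem.Dict.empty : PySem.Dict Int Int)).items

-- ===== PRECONDITION & SPEC =====
def Spec_diagonal_dictionary (sequence_indexes_dictionary : List (String × List Int)) (querykmers_indexes : List (String × List Int)) (out : List (Int × Int)) : Prop := out = diagonal_dictionary_alt sequence_indexes_dictionary querykmers_indexes
instance (sequence_indexes_dictionary : List (String × List Int)) (querykmers_indexes : List (String × List Int)) (out : List (Int × Int)) : Decidable (Spec_diagonal_dictionary sequence_indexes_dictionary querykmers_indexes out) := by unfold Spec_diagonal_dictionary; infer_instance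

-- ===== CLAIM (what is proved, stated in full; the proofs are below) =====
def Claim_equal_diagonal_dictionary : Prop := ∀ (sequence_indexes_dictionary : List (String × List Int)) (querykmers_indexes : List (String × List Int)), Dom_diagonal_dictionary sequence_indexes_dictionary querykmers_indexes → Spec_diagonal_dictionary sequence_indexes_dictionary querykmers_indexes (diagonal_dictionary sequence_indexes_dictionary querykmers_indexes)

-- ===== LEMMAS AND PROOFS =====

-- the common counting step: diag[d] = diag.get(d, 0) + 1
def pvInc (c : PySem.Dict Int Int) (d : Int) : PySem.Dict Int Int := c.insert d (c.getD d 0 + 1)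
-- B's weighted step: diag[e.1] = diag.get(e.1, 0) + e.2
def pvAddW (c : PySem.Dict Int Int) (e : Int × Int) : PySem.Dict Int Int := c.insert e.1 (c.getD e.1 0 + e.2)
-- the full multiset of differences A counts, in A's traversal order
def pvDiffs (sd : PySem.Dict String (List Int)) (q : List (String × List Int)) : List Int :=
  q.flatMap (fun kv => if sd.contains kv.1 then kv.2.flatMap (fun i => (sd.getD kv.1 []).map (fun p => i - p)) else [])
-- B's weighted difference list, in B's traversal order
def pvW (sd : PySem.Dict String (List Int)) (q : List (String × List Int)) : List (Int × Int) :=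
  q.flatMap (fun kv => if sd.contains kv.1 then
      (PySem.Set.ofList kv.2).flatMap (fun vi => (PySem.Set.ofList (sd.getD kv.1 [])).map
        (fun vp => (vi - vp, (kv.2.count vi : Int) * ((sd.getD kv.1 []).count vp : Int))))
    else [])
-- total weight carried by key d in a weighted list
def pvSumW (W : List (Int × Int)) (d : Int) : Int := ((W.filter (fun e => e.1 == d)).map (·.2)).sum

lemma pvStep_eq (c : PySem.Dict Int Int) (d : Int) :
    (if c.contains d then c.modify d 0 (· + 1) else c.insert d 1) = pvInc c d := by
  by_cases h : c.contains d
  · simp only [h, if_true]; rfl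
  · rw [if_neg h, pvInc, PySem.Dict.getD_of_not_contains c 0 (eq_false_of_ne_true h)]; norm_num

lemma foldl_if_nil {γ δ : Type} (b : Bool) (X : List γ) (g : δ → γ → δ) (c : δ) :
    (if b then X else []).foldl g c = if b then X.foldl g c else c := by
  cases b <;> simp

lemma A_inner (i_s p_s : List Int) (c : PySem.Dict Int Int) :
    (PySem.List.pyRange 0 (i_s.length : Int) 1).foldl (fun diag j =>
      (PySem.List.pyRange 0 (p_s.length : Int) 1).foldl (fun diag k =>
        let d := PySem.List.pyGetD i_s j 0 - PySem.List.pyGetD p_s k 0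
        if diag.contains d then diag.modify d 0 (· + 1) else diag.insert d 1)
        diag) c
    = (i_s.flatMap (fun i => p_s.map (fun p => i - p))).foldl pvInc c := by
  rw [List.foldl_flatMap]
  rw [PySem.List.foldl_pyRange_zero_pyGetD' i_s 0 (fun diag iv =>
    (PySem.List.pyRange 0 (p_s.length : Int) 1).foldl (fun diag k =>
      let d := iv - PySem.List.pyGetD p_s k 0
      if diag.contains d then diag.modify d 0 (· + 1) else diag.insert d 1) diag) c]
  apply congrArg (fun f => List.foldl f c i_s)
  funext a i
  rw [PySem.List.foldl_pyRange_zero_pyGetD' p_s 0 (fun diag pv =>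
    let d := i - pv
    if diag.contains d then diag.modify d 0 (· + 1) else diag.insert d 1) a]
  rw [List.foldl_map]
  apply congrArg (fun f => List.foldl f a p_s)
  funext b p
  exact pvStep_eq b (i - p)

lemma A_char (s q : List (String × List Int)) :
    diagonal_dictionary s q
      = (PySem.Dict.counter (pvDiffs (PySem.Dict.ofList s) (PySem.Dict.ofList q).items)).items := by
  unfold diagonal_dictionary
  apply congrArg PySem.Dict.items
  rw [← PySem.Dict.foldl_insert_getD_add_one_eq_counter]
  show _ = List.foldl pvInc PySem.Dict.empty _
  unfold pvDiffs
  rw [List.foldl_flatMap]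
  rw [PySem.Dict.items_eq_map_keys (PySem.Dict.ofList q) (PySem.Dict.nodup_keys_ofList q) []]
  rw [List.foldl_map]
  apply congrArg (fun f => List.foldl f PySem.Dict.empty (PySem.Dict.ofList q).keys)
  funext c k
  by_cases h : (PySem.Dict.ofList s).contains k
  · simp only [h, if_true]
    exact A_inner _ _ c
  · simp only [h, foldl_if_nil]
    simp

lemma B_inner (i_s p_s : List Int) (c : PySem.Dict Int Int) :
    (List.foldl (fun c i => c.insert i (c.getD i 0 + 1)) (PySem.Dict.empty : PySem.Dict Int Int) i_s).items.foldl
      (fun diag vn =>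
        (List.foldl (fun c p => c.insert p (c.getD p 0 + 1)) (PySem.Dict.empty : PySem.Dict Int Int) p_s).items.foldl
          (fun diag wm =>
            let d := vn.1 - wm.1
            diag.insert d (diag.getD d 0 + vn.2 * wm.2)) diag) c
    = ((PySem.Set.ofList i_s).flatMap (fun vi => (PySem.Set.ofList p_s).map
        (fun vp => (vi - vp, (i_s.count vi : Int) * (p_s.count vp : Int))))).foldl pvAddW c := by
  rw [PySem.Dict.foldl_insert_getD_add_one_eq_counter i_s,
      PySem.Dict.foldl_insert_getD_add_one_eq_counter p_s,
      PySem.Dict.items_counter, PySem.Dict.items_counter]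
  rw [List.foldl_flatMap, List.foldl_map]
  apply congrArg (fun f => List.foldl f c (PySem.Set.ofList i_s))
  funext a vi
  rw [List.foldl_map, List.foldl_map]
  rfl

lemma B_char (s q : List (String × List Int)) :
    diagonal_dictionary_alt s q
      = ((pvW (PySem.Dict.ofList s) (PySem.Dict.ofList q).items).foldl pvAddW PySem.Dict.empty).items := by
  unfold diagonal_dictionary_alt
  apply congrArg PySem.Dict.items
  unfold pvW
  rw [List.foldl_flatMap]
  apply congrArg (fun f => List.foldl f PySem.Dict.empty (PySem.Dict.ofList q).items)
  funext c kv
  by_cases h : (PySem.Dict.ofList s).contains kv.1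
  · simp only [h, if_true]
    exact B_inner _ _ c
  · simp only [h, foldl_if_nil]
    simp

lemma getD_foldl_addW (W : List (Int × Int)) (c : PySem.Dict Int Int) (d : Int) :
    (W.foldl pvAddW c).getD d 0 = c.getD d 0 + pvSumW W d := by
  induction W generalizing c with
  | nil => simp [pvSumW]
  | cons e t ih =>
    rw [List.foldl_cons, ih]
    by_cases h : e.1 = d
    · subst h
      simp [pvAddW, pvSumW]
      ring
    · simp [pvAddW, pvSumW, PySem.Dict.getD_insert, Ne.symm h, h]

lemma set_update_congr (s : PySem.Set Int) (xs ys : List Int)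
    (h : PySem.Set.ofList xs = PySem.Set.ofList ys) :
    PySem.Set.update s xs = PySem.Set.update s ys := by
  rw [PySem.Set.update_eq_append_filter, PySem.Set.update_eq_append_filter, h]

lemma set_update_of_subset (s : PySem.Set Int) (xs : List Int) (h : ∀ y ∈ xs, y ∈ s) :
    PySem.Set.update s xs = s := by
  rw [PySem.Set.update_eq_append_filter]
  have hnil : (PySem.Set.ofList xs).filter (fun y => !(PySem.Set.contains s y)) = [] := by
    apply List.filter_eq_nil_iff.mpr
    intro a ha
    simp only [Bool.not_eq_true', Bool.not_eq_false]
    exact (PySem.Set.contains_iff s a).mpr (h a ((PySem.Set.mem_ofList xs a).mp ha))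
  rw [hnil, List.append_nil]

lemma set_ofList_flatMap_congr {γ : Type} (L : List γ) (g g' : γ → List Int)
    (h : ∀ x ∈ L, PySem.Set.ofList (g x) = PySem.Set.ofList (g' x)) :
    PySem.Set.ofList (L.flatMap g) = PySem.Set.ofList (L.flatMap g') := by
  induction L with
  | nil => rfl
  | cons a t ih =>
    rw [List.flatMap_cons, List.flatMap_cons, PySem.Set.ofList_append, PySem.Set.ofList_append,
      h a List.mem_cons_self]
    exact set_update_congr _ _ _ (ih (fun x hx => h x (List.mem_cons_of_mem a hx)))

lemma set_ofList_flatMap_ofList (xs : List Int) (g : Int → List Int) :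
    PySem.Set.ofList (xs.flatMap g) = PySem.Set.ofList ((PySem.Set.ofList xs).flatMap g) := by
  induction xs using List.reverseRecOn with
  | nil => rfl
  | append_singleton t x ih =>
    rw [List.flatMap_append, PySem.Set.ofList_append, PySem.Set.ofList_append_singleton]
    by_cases hx : x ∈ PySem.Set.ofList t
    · rw [PySem.Set.add_of_mem hx, ← ih, List.flatMap_singleton]
      apply set_update_of_subset
      intro y hy
      rw [PySem.Set.mem_ofList]
      exact List.mem_flatMap.mpr ⟨x, (PySem.Set.mem_ofList t x).mp hx, hy⟩
    · rw [PySem.Set.add_of_not_mem hx, List.flatMap_append, PySem.Set.ofList_append, ih,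
        List.flatMap_singleton]

lemma set_ofList_map_ofList (xs : List Int) (f : Int → Int) :
    PySem.Set.ofList (xs.map f) = PySem.Set.ofList ((PySem.Set.ofList xs).map f) := by
  rw [List.map_eq_flatMap, List.map_eq_flatMap, set_ofList_flatMap_ofList]

lemma count_map_sub (l : List Int) (i d : Int) :
    (l.map (fun p => i - p)).count d = l.count (i - d) := by
  conv_lhs => rw [show d = (fun p => i - p) (i - d) by simp]
  exact List.count_map_of_injective _ _ (fun a b h => by omega) _

lemma filter_beq_of_nodup (S : List Int) (h : S.Nodup) (c : Int) :
    S.filter (· == c) = if c ∈ S then [c] else [] := by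
  induction S with
  | nil => simp
  | cons a t ih =>
    rcases List.nodup_cons.mp h with ⟨ha, ht⟩
    by_cases hac : a = c
    · subst hac
      simp [ih ht, ha]
    · simp [hac, ih ht, Ne.symm hac]

lemma sum_map_indicator (S : List Int) (h : S.Nodup) (x : Int) (g : Int → Int) (hx : x ∈ S) :
    (S.map (fun v => if v = x then g v else 0)).sum = g x := by
  induction S with
  | nil => simp at hx
  | cons a t ih =>
    rcases List.nodup_cons.mp h with ⟨ha, ht⟩
    rcases List.mem_cons.mp hx with h1 | h1
    · have hz : (t.map (fun v => if v = x then g v else 0)).sum = 0 := by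
        apply List.sum_eq_zero; intro y hy
        rcases List.mem_map.mp hy with ⟨v, hv, rfl⟩
        have hvx : v ≠ x := fun e => ha (by rw [← h1, ← e]; exact hv)
        simp [hvx]
      rw [List.map_cons, List.sum_cons, if_pos h1.symm, hz, add_zero, h1]
    · have hax : a ≠ x := fun e => ha (e ▸ h1)
      simp [hax, ih ht h1]

lemma sum_ofList_count_mul (l : List Int) (f : Int → Int) :
    ((PySem.Set.ofList l).map (fun v => (l.count v : Int) * f v)).sum = (l.map f).sum := by
  induction l using List.reverseRecOn with
  | nil => rfl
  | append_singleton t x ih =>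
    rw [PySem.Set.ofList_append_singleton, List.map_append, List.sum_append]
    have hcnt : ∀ v : Int, ((t ++ [x]).count v : Int) = (t.count v : Int) + (if v = x then 1 else 0) := by
      intro v
      rw [List.count_append, List.count_singleton]
      by_cases h : v = x
      · simp [h]
      · simp [h, Ne.symm h]
    by_cases hx : x ∈ PySem.Set.ofList t
    · rw [PySem.Set.add_of_mem hx]
      have hsplit : ((PySem.Set.ofList t).map (fun v => ((t ++ [x]).count v : Int) * f v)).sum
          = ((PySem.Set.ofList t).map (fun v => (t.count v : Int) * f v)).sum
            + ((PySem.Set.ofList t).map (fun v => if v = x then f v else 0)).sum := by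
        rw [← PySem.List.sum_map_add_int]
        congr 1; apply List.map_congr_left
        intro v _
        rw [hcnt v]; by_cases h : v = x
        · simp [h]; ring
        · simp [h]
      rw [hsplit, ih, sum_map_indicator _ (PySem.Set.nodup_ofList t) x f hx]
      simp
    · rw [PySem.Set.add_of_not_mem hx, List.map_append, List.sum_append]
      have hxt : x ∉ t := fun h => hx ((PySem.Set.mem_ofList t x).mpr h)
      have h1 : ((PySem.Set.ofList t).map (fun v => ((t ++ [x]).count v : Int) * f v)).sum
          = ((PySem.Set.ofList t).map (fun v => (t.count v : Int) * f v)).sum := by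
        congr 1; apply List.map_congr_left
        intro v hv
        have : v ≠ x := fun e => hxt (e ▸ (PySem.Set.mem_ofList t v).mp hv)
        rw [hcnt v]; simp [this]
      rw [h1, ih]
      simp [List.count_eq_zero.mpr hxt]

-- per-kmer key order: deduplicating both index lists leaves the first-occurrence order of diagonals unchanged
lemma alpha_kmer (i_s p_s : List Int) :
    PySem.Set.ofList ((PySem.Set.ofList i_s).flatMap (fun vi => (PySem.Set.ofList p_s).map (fun vp => vi - vp)))
      = PySem.Set.ofList (i_s.flatMap (fun i => p_s.map (fun p => i - p))) := by
  rw [set_ofList_flatMap_ofList i_s (fun i => p_s.map (fun p => i - p))]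
  exact (set_ofList_flatMap_congr (PySem.Set.ofList i_s)
    (fun i => p_s.map (fun p => i - p)) (fun vi => (PySem.Set.ofList p_s).map (fun vp => vi - vp))
    (fun x _ => set_ofList_map_ofList p_s (fun p => x - p))).symm

lemma alpha (sd : PySem.Dict String (List Int)) (L : List (String × List Int)) :
    PySem.Set.ofList ((pvW sd L).map (·.1)) = PySem.Set.ofList (pvDiffs sd L) := by
  unfold pvW pvDiffs
  rw [List.map_flatMap]
  apply set_ofList_flatMap_congr
  intro kv _
  by_cases h : sd.contains kv.1
  · simp only [h, if_true, List.map_flatMap, List.map_map]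
    simp only [Function.comp_def]
    exact alpha_kmer kv.2 (sd.getD kv.1 [])
  · simp [h]

lemma pvSumW_append (W₁ W₂ : List (Int × Int)) (d : Int) :
    pvSumW (W₁ ++ W₂) d = pvSumW W₁ d + pvSumW W₂ d := by
  simp [pvSumW, List.filter_append]

lemma pvSumW_flatMap {γ : Type} (L : List γ) (G : γ → List (Int × Int)) (d : Int) :
    pvSumW (L.flatMap G) d = (L.map (fun x => pvSumW (G x) d)).sum := by
  induction L with
  | nil => simp [pvSumW]
  | cons a t ih => simp [List.flatMap_cons, pvSumW_append, ih]

lemma count_flatMap {γ : Type} (L : List γ) (G : γ → List Int) (d : Int) :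
    (L.flatMap G).count d = (L.map (fun x => (G x).count d)).sum := by
  induction L with
  | nil => simp
  | cons a t ih => simp [List.flatMap_cons, List.count_append, ih]

lemma cast_sum_map {γ : Type} (l : List γ) (g : γ → Nat) :
    (((l.map g).sum : Nat) : Int) = (l.map (fun x => (g x : Int))).sum := by
  induction l with
  | nil => rfl
  | cons a t ih => simp [ih]

-- per-kmer weights: summed multiplicity products equal the raw pair count
lemma beta_kmer (i_s p_s : List Int) (d : Int) :
    pvSumW ((PySem.Set.ofList i_s).flatMap (fun vi => (PySem.Set.ofList p_s).map
        (fun vp => (vi - vp, (i_s.count vi : Int) * (p_s.count vp : Int))))) d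
      = ((i_s.flatMap (fun i => p_s.map (fun p => i - p))).count d : Int) := by
  rw [pvSumW_flatMap, count_flatMap, cast_sum_map]
  have hinner : ∀ vi : Int,
      pvSumW ((PySem.Set.ofList p_s).map (fun vp => (vi - vp, (i_s.count vi : Int) * (p_s.count vp : Int)))) d
        = (i_s.count vi : Int) * (p_s.count (vi - d) : Int) := by
    intro vi
    unfold pvSumW
    rw [List.filter_map, List.map_map]
    have hpred : ((PySem.Set.ofList p_s).filter
        ((fun (e : Int × Int) => e.1 == d) ∘ (fun vp => (vi - vp, (i_s.count vi : Int) * (p_s.count vp : Int)))))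
        = (PySem.Set.ofList p_s).filter (· == (vi - d)) := by
      apply List.filter_congr
      intro vp _
      by_cases h : vi - vp = d
      · simp [Function.comp, show vp = vi - d by omega]
      · simp [Function.comp, h, show vp ≠ vi - d by omega]
    rw [hpred, filter_beq_of_nodup _ (PySem.Set.nodup_ofList p_s) _]
    by_cases hm : (vi - d) ∈ PySem.Set.ofList p_s
    · simp [hm]
    · have : p_s.count (vi - d) = 0 :=
        List.count_eq_zero.mpr (fun h => hm ((PySem.Set.mem_ofList p_s _).mpr h))
      simp [hm, this]
  calc ((PySem.Set.ofList i_s).map (fun vi => pvSumW _ d)).sum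
      = ((PySem.Set.ofList i_s).map (fun vi => (i_s.count vi : Int) * (p_s.count (vi - d) : Int))).sum := by
        apply congrArg; exact List.map_congr_left (fun vi _ => hinner vi)
    _ = (i_s.map (fun i => (p_s.count (i - d) : Int))).sum := sum_ofList_count_mul i_s _
    _ = (i_s.map (fun i => (((p_s.map (fun p => i - p)).count d : Nat) : Int))).sum := by
        apply congrArg; apply List.map_congr_left; intro i _; rw [count_map_sub]

lemma beta (sd : PySem.Dict String (List Int)) (L : List (String × List Int)) (d : Int) :
    pvSumW (pvW sd L) d = ((pvDiffs sd L).count d : Int) := by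
  unfold pvW pvDiffs
  induction L with
  | nil => simp [pvSumW]
  | cons kv t ih =>
    rw [List.flatMap_cons, List.flatMap_cons, pvSumW_append, List.count_append]
    push_cast
    rw [ih]
    congr 1
    by_cases h : sd.contains kv.1
    · simp only [h, if_true]
      exact beta_kmer kv.2 (sd.getD kv.1 []) d
    · simp [h, pvSumW]

-- ===== VERDICT (by name: the statement is the Claim_ definition above) =====
theorem diagonal_dictionary_spec : Claim_equal_diagonal_dictionary := by
  intro s q _
  show diagonal_dictionary s q = diagonal_dictionary_alt s q
  rw [A_char, B_char]
  have hnodup : ((pvW (PySem.Dict.ofList s) (PySem.Dict.ofList q).items).foldl pvAddW PySem.Dict.empty).keys.Nodup :=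
    PySem.Dict.nodup_keys_foldl_insert_key _ (fun (e : Int × Int) => e.1)
      (fun c e => c.getD e.1 0 + e.2) PySem.Dict.empty PySem.Dict.nodup_keys_empty
  have hkeys : ((pvW (PySem.Dict.ofList s) (PySem.Dict.ofList q).items).foldl pvAddW PySem.Dict.empty).keys
      = PySem.Set.ofList (pvDiffs (PySem.Dict.ofList s) (PySem.Dict.ofList q).items) := by
    have h1 := PySem.Dict.keys_foldl_insert_key (pvW (PySem.Dict.ofList s) (PySem.Dict.ofList q).items)
      (fun (e : Int × Int) => e.1) (fun c e => c.getD e.1 0 + e.2) (PySem.Dict.empty : PySem.Dict Int Int)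
    rw [PySem.Dict.keys_empty, PySem.Set.update_nil_left] at h1
    rw [show (List.foldl pvAddW PySem.Dict.empty (pvW (PySem.Dict.ofList s) (PySem.Dict.ofList q).items))
        = (List.foldl (fun (d : PySem.Dict Int Int) (x : Int × Int) => d.insert x.1 (d.getD x.1 0 + x.2))
            PySem.Dict.empty (pvW (PySem.Dict.ofList s) (PySem.Dict.ofList q).items)) from rfl]
    rw [h1, alpha]
  rw [PySem.Dict.items_counter, PySem.Dict.items_eq_map_keys _ hnodup 0, hkeys]
  apply List.map_congr_left
  intro k _
  rw [getD_foldl_addW, PySem.Dict.getD_empty, beta]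
  simp
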